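-- pv_equiv track=rewrite | github.com/giper45/SW-Metrics-Collection | metrics/instability/java/i-jdepend/collect.py | match_known_package
-- ===== SOURCE A (Python) =====
-- def match_known_package(import_path, known_packages):
--     candidates = [
--         package
--         for package in known_packages
--         if import_path == package or import_path.startswith(package + ".")
--     ]
--     if not candidates:
--         return None
--     return max(candidates, key=len)
-- ===== SOURCE B (Python) =====
-- def match_known_package(import_path, known_packages):
--     known = set(known_packages)
--     parts = import_path.split(".")
--     for i in range(len(parts), 0, -1):
--         prefix = ".".join(parts[:i])
--         if prefix in known:
--             return prefix
--     return None
-- ===== Notes on version B (the rewrite author's own statement) =====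
-- stated objective: alternative
-- what changed: Instead of filtering every known package by an equality/startswith test and taking the max by length, B builds a set of the known packages once and walks the dot-separated prefixes of import_path from longest to shortest, returning the first one found in the set.
import Mathlib
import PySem

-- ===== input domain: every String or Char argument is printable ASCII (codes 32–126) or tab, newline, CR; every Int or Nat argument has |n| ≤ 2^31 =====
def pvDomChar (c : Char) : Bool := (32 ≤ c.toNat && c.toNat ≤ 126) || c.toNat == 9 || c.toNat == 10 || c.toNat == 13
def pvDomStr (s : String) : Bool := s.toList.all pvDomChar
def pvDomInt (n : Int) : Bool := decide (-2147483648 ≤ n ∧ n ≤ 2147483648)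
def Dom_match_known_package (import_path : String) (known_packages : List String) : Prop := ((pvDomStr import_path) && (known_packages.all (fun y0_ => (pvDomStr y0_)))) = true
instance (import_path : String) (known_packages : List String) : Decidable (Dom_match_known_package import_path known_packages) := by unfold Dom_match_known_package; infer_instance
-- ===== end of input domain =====

-- B walks the dot-separated prefixes of import_path longest-first with a set-membership test,
-- instead of A's filter over all known packages followed by max-by-length (alternative algorithm).


-- ===== PORT A =====
def match_known_package (import_path : String) (known_packages : List String) : Option String :=
  let candidates := known_packages.filter
    (fun package => import_path == package || PySem.Str.startswith import_path (package ++ "."))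
  if candidates.isEmpty then none
  else PySem.List.max? candidates PySem.Str.len

-- ===== PORT B =====
-- the for-loop over range(len(parts), 0, -1): the counter counts the prefixes still to try
def altGo (known : PySem.Set String) (parts : List String) : Nat → Option String
  | 0 => none
  | i + 1 =>
    let prefix_ := PySem.Str.join "." (parts.take (i + 1))
    if known.contains prefix_ then some prefix_ else altGo known parts i

def match_known_package_alt (import_path : String) (known_packages : List String) : Option String :=
  let known := PySem.Set.ofList known_packages
  let parts := (PySem.Chars.splitOn import_path.toList ['.']).map String.ofList
  altGo known parts parts.length

-- ===== PRECONDITION & SPEC =====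
def Spec_match_known_package (import_path : String) (known_packages : List String) (out : Option String) : Prop := out = match_known_package_alt import_path known_packages
instance (import_path : String) (known_packages : List String) (out : Option String) : Decidable (Spec_match_known_package import_path known_packages out) := by unfold Spec_match_known_package; infer_instance

-- ===== CLAIM (what is proved, stated in full; the proofs are below) =====
def Claim_equal_match_known_package : Prop := ∀ (import_path : String) (known_packages : List String), Dom_match_known_package import_path known_packages → Spec_match_known_package import_path known_packages (match_known_package import_path known_packages)

-- ===== LEMMAS AND PROOFS =====

def sp : List Char → List (List Char)
  | [] => [[]]
  | c :: rest =>
    if c = '.' then [] :: sp rest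
    else
      match sp rest with
      | [] => [[c]]
      | p :: ps => (c :: p) :: ps

theorem sp_ne_nil (s : List Char) : sp s ≠ [] := by
  match s with
  | [] => simp [sp]
  | c :: rest =>
    by_cases h : c = '.'
    · simp [sp, h]
    · simp only [sp, h, if_false]
      cases hr : sp rest <;> simp

theorem splitOn_go_eq :
    ∀ (fuel : Nat) (l cur : List Char) (acc : List (List Char)), l.length < fuel →
      PySem.Chars.splitOn.go ['.'] fuel l cur acc =
        acc.reverse ++ (match sp l with
          | [] => []
          | p :: ps => (cur.reverse ++ p) :: ps) := by
  intro fuel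
  induction fuel with
  | zero => intro l cur acc h; omega
  | succ fuel ih =>
    intro l cur acc h
    cases l with
    | nil => simp [PySem.Chars.splitOn.go, sp]
    | cons c rest =>
      by_cases hc : c = '.'
      · subst hc
        have hpre : List.isPrefixOf ['.'] ('.' :: rest) = true := by
          simp [List.isPrefixOf]
        rw [PySem.Chars.splitOn.go]
        simp only [hpre, if_pos, List.length_cons, List.length_nil, List.drop_succ_cons, List.drop_zero]
        rw [ih rest [] (cur.reverse :: acc) (by simpa using Nat.lt_of_succ_lt_succ h)]
        cases hr : sp rest with
        | nil => exact absurd hr (sp_ne_nil rest)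
        | cons p ps => simp [sp, hr]
      · have hpre : List.isPrefixOf ['.'] (c :: rest) = false := by
          simp [List.isPrefixOf]; exact fun hh => absurd hh.symm hc
        rw [PySem.Chars.splitOn.go]
        simp only [hpre, Bool.false_eq_true, if_neg, not_false_iff]
        rw [ih rest (c :: cur) acc (by simpa using Nat.lt_of_succ_lt_succ h)]
        cases hr : sp rest with
        | nil => exact absurd hr (sp_ne_nil rest)
        | cons p ps => simp [sp, hr, hc]

theorem splitOn_eq_sp (s : List Char) :
    PySem.Chars.splitOn s ['.'] = sp s := by
  rw [PySem.Chars.splitOn, splitOn_go_eq (s.length + 1) s [] [] (by omega)]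
  cases hr : sp s with
  | nil => exact absurd hr (sp_ne_nil s)
  | cons p ps => simp

def Js (s : List Char) (i : Nat) : List Char := PySem.Chars.join ['.'] ((sp s).take i)

theorem join_cons_head (c : Char) (p : List Char) (l : List (List Char)) :
    PySem.Chars.join ['.'] ((c :: p) :: l) = c :: PySem.Chars.join ['.'] (p :: l) := by
  cases l with
  | nil => simp [PySem.Chars.join_singleton]
  | cons q t => simp [PySem.Chars.join_cons_cons]

theorem sp_dot (t : List Char) : sp ('.' :: t) = [] :: sp t := by simp [sp]

theorem sp_head (c : Char) (hc : c ≠ '.') (t : List Char) :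
    ∃ p ps, sp t = p :: ps ∧ sp (c :: t) = (c :: p) :: ps := by
  cases hr : sp t with
  | nil => exact absurd hr (sp_ne_nil t)
  | cons p ps => exact ⟨p, ps, rfl, by simp [sp, hc, hr]⟩

theorem Js_dot_succ (t : List Char) {i : Nat} (h : 1 ≤ i) :
    Js ('.' :: t) (i + 1) = '.' :: Js t i := by
  obtain ⟨k, rfl⟩ : ∃ k, i = k + 1 := ⟨i - 1, by omega⟩
  cases hr : sp t with
  | nil => exact absurd hr (sp_ne_nil t)
  | cons p ps =>
    show PySem.Chars.join ['.'] (((sp ('.'::t)).take (k+2))) = _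
    rw [sp_dot, hr]
    simp only [List.take_succ_cons]
    rw [PySem.Chars.join_cons_cons]
    simp [Js, hr]

theorem Js_dot_one (t : List Char) : Js ('.' :: t) 1 = [] := by
  rw [Js, sp_dot]
  simp [PySem.Chars.join_singleton]

theorem Js_head (c : Char) (hc : c ≠ '.') (t : List Char) {i : Nat} (h : 1 ≤ i) :
    Js (c :: t) i = c :: Js t i := by
  obtain ⟨p, ps, h1, h2⟩ := sp_head c hc t
  obtain ⟨k, rfl⟩ : ∃ k, i = k + 1 := ⟨i - 1, by omega⟩
  rw [Js, h2, List.take_succ_cons, join_cons_head, Js, h1, List.take_succ_cons]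

theorem cand_iff (s : List Char) : ∀ (p : List Char),
    (p = s ∨ ∃ r, s = p ++ '.' :: r) ↔
      ∃ i, 1 ≤ i ∧ i ≤ (sp s).length ∧ p = Js s i := by
  induction s with
  | nil =>
    intro p
    constructor
    · rintro (rfl | ⟨r, hr⟩)
      · exact ⟨1, le_refl 1, by simp [sp], by simp [Js, sp, PySem.Chars.join_singleton]⟩
      · exact absurd hr (by simp)
    · rintro ⟨i, h1, h2, rfl⟩
      have : i = 1 := by simp [sp] at h2; omega
      subst this
      left; simp [Js, sp, PySem.Chars.join_singleton]
  | cons c t ih =>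
    intro p
    by_cases hc : c = '.'
    · subst hc
      constructor
      · rintro (rfl | ⟨r, hr⟩)
        · -- p = '.' :: t : use ih with p' = t, first disjunct
          obtain ⟨i, h1, h2, h3⟩ := (ih t).mp (Or.inl rfl)
          exact ⟨i + 1, by omega, by rw [sp_dot]; simpa using h2,
            by rw [Js_dot_succ t h1, ← h3]⟩
        · cases p with
          | nil => exact ⟨1, le_refl 1, by rw [sp_dot]; simp, (Js_dot_one t).symm⟩
          | cons x p' =>
            have hx : '.' = x ∧ t = p' ++ '.' :: r := by
              simpa using hr
            obtain ⟨hx1, ht⟩ := hx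
            subst hx1
            obtain ⟨i, h1, h2, h3⟩ := (ih p').mp (Or.inr ⟨r, ht⟩)
            exact ⟨i + 1, by omega, by rw [sp_dot]; simpa using h2,
              by rw [Js_dot_succ t h1, ← h3]⟩
      · rintro ⟨i, h1, h2, rfl⟩
        obtain ⟨k, rfl⟩ : ∃ k, i = k + 1 := ⟨i - 1, by omega⟩
        rcases Nat.eq_zero_or_pos k with rfl | hk
        · right; exact ⟨t, by rw [Js_dot_one]; rfl⟩
        · rw [Js_dot_succ t hk]
          have h2' : k ≤ (sp t).length := by rw [sp_dot] at h2; simpa using h2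
          rcases (ih (Js t k)).mpr ⟨k, hk, h2', rfl⟩ with h | ⟨r, hr⟩
          · left; rw [h]
          · right; exact ⟨r, by conv_lhs => rw [hr]; rw [← List.cons_append]⟩
    · obtain ⟨p0, ps0, hsp, hsp2⟩ := sp_head c hc t
      constructor
      · rintro (rfl | ⟨r, hr⟩)
        · obtain ⟨i, h1, h2, h3⟩ := (ih t).mp (Or.inl rfl)
          refine ⟨i, h1, by rw [hsp2]; rw [hsp] at h2; simpa using h2, ?_⟩
          rw [Js_head c hc t h1, ← h3]
        · cases p with
          | nil => simp at hr; exact absurd hr.1 hc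
          | cons x p' =>
            have hx : c = x ∧ t = p' ++ '.' :: r := by simpa using hr
            obtain ⟨hx1, ht⟩ := hx
            subst hx1
            obtain ⟨i, h1, h2, h3⟩ := (ih p').mp (Or.inr ⟨r, ht⟩)
            refine ⟨i, h1, by rw [hsp2]; rw [hsp] at h2; simpa using h2, ?_⟩
            rw [Js_head c hc t h1, ← h3]
      · rintro ⟨i, h1, h2, rfl⟩
        have h2' : i ≤ (sp t).length := by
          rw [hsp2] at h2; rw [hsp]; simpa using h2
        rw [Js_head c hc t h1]
        rcases (ih (Js t i)).mpr ⟨i, h1, h2', rfl⟩ with h | ⟨r, hr⟩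
        · left; rw [h]
        · right; exact ⟨r, by conv_lhs => rw [hr]; rw [← List.cons_append]⟩

theorem Js_len_succ (s : List Char) : ∀ {i : Nat}, 1 ≤ i → i < (sp s).length →
    (Js s i).length < (Js s (i + 1)).length := by
  induction s with
  | nil => intro i h1 h2; simp [sp] at h2; omega
  | cons c t ih =>
    intro i h1 h2
    by_cases hc : c = '.'
    · subst hc
      rcases Nat.eq_or_lt_of_le h1 with rfl | hk
      · rw [Js_dot_one, Js_dot_succ t (le_refl 1)]
        simp
      · obtain ⟨k, rfl⟩ : ∃ k, i = k + 1 := ⟨i - 1, by omega⟩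
        have hk1 : 1 ≤ k := by omega
        have hk2 : k < (sp t).length := by rw [sp_dot] at h2; simpa using h2
        rw [Js_dot_succ t hk1, Js_dot_succ t (by omega : 1 ≤ k + 1)]
        simpa using ih hk1 hk2
    · obtain ⟨p0, ps0, hsp, hsp2⟩ := sp_head c hc t
      have h2' : i < (sp t).length := by
        rw [hsp2] at h2; rw [hsp]; simpa using h2
      rw [Js_head c hc t h1, Js_head c hc t (by omega : 1 ≤ i + 1)]
      simpa using ih h1 h2'

theorem Js_len_lt (s : List Char) {i j : Nat} (h1 : 1 ≤ i) (h2 : i < j)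
    (h3 : j ≤ (sp s).length) : (Js s i).length < (Js s j).length := by
  induction j with
  | zero => omega
  | succ k ih =>
    rcases Nat.lt_or_ge i k with hik | hik
    · exact lt_trans (ih hik (by omega)) (Js_len_succ s (by omega) (by omega))
    · have : i = k := by omega
      subst this
      exact Js_len_succ s h1 (by omega)

theorem altGo_none (known : PySem.Set String) (parts : List String) :
    ∀ (i : Nat), (∀ j, 1 ≤ j → j ≤ i → PySem.Str.join "." (parts.take j) ∉ known) →
    altGo known parts i = none := by
  intro i
  induction i with
  | zero => intro _; rfl
  | succ k ih =>
    intro h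
    have hni : PySem.Str.join "." (parts.take (k + 1)) ∉ known := h (k + 1) (by omega) (le_refl _)
    have : known.contains (PySem.Str.join "." (parts.take (k + 1))) = false := by
      rw [← Bool.not_eq_true, PySem.Set.contains_iff]; exact hni
    simp only [altGo, this, Bool.false_eq_true, if_false]
    exact ih (fun j hj1 hj2 => h j hj1 (by omega))

theorem altGo_some (known : PySem.Set String) (parts : List String) (j : Nat)
    (h1 : 1 ≤ j) (hmem : PySem.Str.join "." (parts.take j) ∈ known) :
    ∀ (i : Nat), j ≤ i → (∀ k, j < k → k ≤ i → PySem.Str.join "." (parts.take k) ∉ known) →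
    altGo known parts i = some (PySem.Str.join "." (parts.take j)) := by
  intro i
  induction i with
  | zero => intro h2 _; omega
  | succ m ih =>
    intro h2 hmax
    rcases Nat.eq_or_lt_of_le h2 with rfl | hlt
    · have hc : known.contains (PySem.Str.join "." (parts.take (m + 1))) = true :=
        (PySem.Set.contains_iff known _).mpr hmem
      simp only [altGo, hc, if_true]
    · have hni : PySem.Str.join "." (parts.take (m + 1)) ∉ known :=
        hmax (m + 1) (by omega) (le_refl _)
      have : known.contains (PySem.Str.join "." (parts.take (m + 1))) = false := by
        rw [← Bool.not_eq_true, PySem.Set.contains_iff]; exact hni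
      simp only [altGo, this, Bool.false_eq_true, if_false]
      exact ih (by omega) (fun k hk1 hk2 => hmax k hk1 (by omega))

theorem main_eq (ip : String) (kp : List String) :
    match_known_package ip kp = match_known_package_alt ip kp := by
  have halt : match_known_package_alt ip kp =
      altGo (PySem.Set.ofList kp) ((sp ip.toList).map String.ofList)
        ((sp ip.toList).map String.ofList).length := by
    simp only [match_known_package_alt, splitOn_eq_sp]
  set s := ip.toList with hs
  set parts : List String := (sp s).map String.ofList with hparts
  have hplen : parts.length = (sp s).length := by simp [hparts]
  have htoList : ∀ j : Nat, (PySem.Str.join "." (parts.take j)).toList = Js s j := by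
    intro j
    simp [hparts, PySem.Str.join, PySem.Chars.join, Js, List.map_take, List.map_map,
      Function.comp_def]
  have hofList : ∀ j : Nat, PySem.Str.join "." (parts.take j) = String.ofList (Js s j) := by
    intro j
    rw [← htoList j]
    simp only [String.ofList_toList]
  have hcond : ∀ q : String,
      (ip == q || PySem.Str.startswith ip (q ++ ".")) = true ↔
        (q.toList = s ∨ ∃ r, s = q.toList ++ '.' :: r) := by
    intro q
    rw [Bool.or_eq_true]
    constructor
    · rintro (h | h)
      · left
        rw [beq_iff_eq] at h
        rw [← h]
      · right
        have hpre := (PySem.Chars.startswith_iff ip.toList (q ++ ".").toList).mp h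
        have heq : (q ++ ".").toList = q.toList ++ ['.'] := by simp
        rw [heq] at hpre
        obtain ⟨r, hr⟩ := hpre
        refine ⟨r, ?_⟩
        show ip.toList = q.toList ++ '.' :: r
        rw [← hr, List.append_assoc]
        simp
    · rintro (h | ⟨r, hr⟩)
      · left
        rw [beq_iff_eq]
        have h2 : q = ip := by
          have := congrArg String.ofList h
          simpa [hs] using this
        exact h2.symm
      · right
        apply (PySem.Chars.startswith_iff ip.toList (q ++ ".").toList).mpr
        have heq : (q ++ ".").toList = q.toList ++ ['.'] := by simp
        rw [heq]
        exact ⟨r, by rw [List.append_assoc]; exact hr.symm⟩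
  rcases hfil : kp.filter (fun q => ip == q || PySem.Str.startswith ip (q ++ ".")) with _ | ⟨m0, rest⟩
  · -- no candidates: both none
    have hA : match_known_package ip kp = none := by
      simp only [match_known_package, hfil]
      rfl
    rw [hA, halt]
    symm
    apply altGo_none
    intro j hj1 hj2 hmem
    rw [PySem.Set.mem_ofList] at hmem
    have hcnd := (hcond (PySem.Str.join "." (parts.take j))).mpr
      ((cand_iff s _).mpr ⟨j, hj1, by omega, (htoList j)⟩)
    have := List.filter_eq_nil_iff.mp hfil _ hmem
    exact this hcnd
  · -- candidates nonempty
    have hne : kp.filter (fun q => ip == q || PySem.Str.startswith ip (q ++ ".")) ≠ [] := by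
      rw [hfil]; simp
    obtain ⟨mx, hmx⟩ : ∃ m, PySem.List.max?
        (kp.filter (fun q => ip == q || PySem.Str.startswith ip (q ++ "."))) PySem.Str.len = some m := by
      cases hm : PySem.List.max? (kp.filter (fun q => ip == q || PySem.Str.startswith ip (q ++ "."))) PySem.Str.len
      · exact absurd ((PySem.List.max?_eq_none_iff _ _).mp hm) hne
      · exact ⟨_, rfl⟩
    have hA : match_known_package ip kp = some mx := by
      simp only [match_known_package, hfil, List.isEmpty_cons, Bool.false_eq_true, if_false]
      rw [← hfil]
      exact hmx
    have hmx_mem := PySem.List.max?_mem hmx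
    rw [List.mem_filter] at hmx_mem
    obtain ⟨hmx_kp, hmx_cond⟩ := hmx_mem
    obtain ⟨im, him1, him2, himJ⟩ := (cand_iff s mx.toList).mp ((hcond mx).mp hmx_cond)
    have hmxe : mx = PySem.Str.join "." (parts.take im) := by
      rw [hofList im, ← himJ]
      simp
    set P : Nat → Prop := fun j => 1 ≤ j ∧ PySem.Str.join "." (parts.take j) ∈ kp with hP
    letI : DecidablePred P := Classical.decPred P
    have hPim : P im := ⟨him1, by rw [← hmxe]; exact hmx_kp⟩
    have him_le : im ≤ parts.length := by omega
    set i0 := Nat.findGreatest P parts.length with hi0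
    have hPi0 : P i0 := Nat.findGreatest_spec him_le hPim
    have hi0_le : i0 ≤ parts.length := Nat.findGreatest_le parts.length
    have hge : im ≤ i0 := Nat.le_findGreatest him_le hPim
    have hB : match_known_package_alt ip kp = some (PySem.Str.join "." (parts.take i0)) := by
      rw [halt]
      apply altGo_some (PySem.Set.ofList kp) parts i0 hPi0.1
        ((PySem.Set.mem_ofList _ _).mpr hPi0.2) parts.length hi0_le
      intro k hk1 hk2 hmem
      rw [PySem.Set.mem_ofList] at hmem
      exact Nat.findGreatest_is_greatest hk1 hk2 ⟨by omega, hmem⟩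
    -- max length forces i0 = im
    have hc0 : (ip == PySem.Str.join "." (parts.take i0) ||
        PySem.Str.startswith ip (PySem.Str.join "." (parts.take i0) ++ ".")) = true :=
      (hcond _).mpr ((cand_iff s _).mpr ⟨i0, hPi0.1, by omega, (htoList i0)⟩)
    have hmem_fil : PySem.Str.join "." (parts.take i0) ∈
        kp.filter (fun q => ip == q || PySem.Str.startswith ip (q ++ ".")) :=
      List.mem_filter.mpr ⟨hPi0.2, hc0⟩
    have hlen_le : PySem.Str.len (PySem.Str.join "." (parts.take i0)) ≤ PySem.Str.len mx :=
      PySem.List.max?_isMax hmx _ hmem_fil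
    have hlen_le' : (Js s i0).length ≤ (Js s im).length := by
      have h1 : PySem.Str.len (PySem.Str.join "." (parts.take i0)) = ((Js s i0).length : Int) := by
        rw [PySem.Str.len, htoList i0]
      have h2 : PySem.Str.len mx = ((Js s im).length : Int) := by
        rw [PySem.Str.len, himJ]
      rw [h1, h2] at hlen_le
      exact_mod_cast hlen_le
    have hi0_eq : i0 = im := by
      rcases Nat.eq_or_lt_of_le hge with h | h
      · omega
      · exact absurd (Js_len_lt s him1 h (by omega)) (by omega)
    rw [hA, hB, hi0_eq, ← hmxe]

-- ===== VERDICT (by name: the statement is the Claim_ definition above) =====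
theorem match_known_package_spec : Claim_equal_match_known_package := by
  intro ip kp _
  unfold Spec_match_known_package
  exact main_eq ip kp
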